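-- pv_equiv track=rewrite | github.com/john-kurkowski/barflyextract | src/barflyextract/extract.py | _dedupe_recipe_blocks
-- ===== SOURCE A (Python) =====
-- def _split_recipe_blocks(recipe: str) -> list[str]:
--     """Split a recipe into "##" headed blocks for cross-item deduping."""
--     blocks: list[str] = []
--     current: list[str] = []
--     for line in recipe.splitlines():
--         if line.startswith("## ") and current:
--             blocks.append("\n".join(current).strip())
--             current = []
--         current.append(line)
--     if current:
--         blocks.append("\n".join(current).strip())
--     return blocks
--
-- def _dedupe_recipe_blocks(recipe: str, seen: set[str]) -> str:
--     """Drop repeated recipe blocks across items to avoid duplicated hits."""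
--     blocks = _split_recipe_blocks(recipe)
--     kept: list[str] = []
--     for block in blocks:
--         if block in seen:
--             continue
--         seen.add(block)
--         kept.append(block)
--     return "\n\n".join(kept)
-- ===== SOURCE B (Python) =====
-- def _dedupe_recipe_blocks(recipe: str, seen: set[str]) -> str:
--     """Two-pointer index scan over the lines to slice out '## ' blocks,
--     then dedupe in bulk with dict.fromkeys + a filter against seen."""
--     lines = recipe.splitlines()
--     blocks: list[str] = []
--     i = 0
--     while i < len(lines):
--         j = i + 1
--         while j < len(lines) and not lines[j].startswith("## "):
--             j += 1
--         blocks.append("\n".join(lines[i:j]).strip())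
--         i = j
--     kept = [b for b in dict.fromkeys(blocks) if b not in seen]
--     seen.update(kept)
--     return "\n\n".join(kept)
-- ===== Notes on version B (the rewrite author's own statement) =====
-- stated objective: alternative
-- what changed: Replaces A's accumulator passes (a line-buffer loop building every block, then a seen-membership loop) with an index-based two-pointer scan that slices each block out of the line list, followed by a bulk dedupe via dict.fromkeys and one filter against seen.
import Mathlib
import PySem

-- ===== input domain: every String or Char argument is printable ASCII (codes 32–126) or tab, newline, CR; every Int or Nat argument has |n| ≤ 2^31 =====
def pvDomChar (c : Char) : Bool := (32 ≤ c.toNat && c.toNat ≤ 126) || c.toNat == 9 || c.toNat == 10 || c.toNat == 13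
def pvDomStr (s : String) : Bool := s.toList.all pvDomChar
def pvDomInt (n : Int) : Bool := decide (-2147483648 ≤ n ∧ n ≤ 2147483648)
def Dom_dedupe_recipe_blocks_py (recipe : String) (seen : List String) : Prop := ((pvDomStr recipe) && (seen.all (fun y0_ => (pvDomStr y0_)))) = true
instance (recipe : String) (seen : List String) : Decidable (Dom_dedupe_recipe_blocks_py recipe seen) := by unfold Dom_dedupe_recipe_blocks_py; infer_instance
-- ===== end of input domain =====

-- B replaces A's accumulator folds (a line-buffer fold building all blocks, then a membership
-- loop kept/seen) by an index-based two-pointer scan that slices each block out of the line list,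
-- followed by a bulk dedupe (dict.fromkeys, then one filter against seen). Same cost, different
-- traversal. Both Pythons mutate the caller's 'seen' set identically; the equivalence proved here
-- is about the return value.

-- ===== PORT A =====
def pvSplitStep (st : List String × List String) (line : String) : List String × List String :=
  if PySem.Str.startswith line "## " && !st.2.isEmpty then
    (st.1 ++ [PySem.Str.strip (PySem.Str.join "\n" st.2)], [line])
  else
    (st.1, st.2 ++ [line])

def pvSplitRecipeBlocks (recipe : String) : List String :=
  let st := (PySem.Str.splitlines recipe).foldl pvSplitStep ([], [])
  if st.2.isEmpty then st.1
  else st.1 ++ [PySem.Str.strip (PySem.Str.join "\n" st.2)]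

def pvDedupeStep (st : PySem.Set String × List String) (block : String) :
    PySem.Set String × List String :=
  if PySem.Set.contains st.1 block then st
  else (PySem.Set.add st.1 block, st.2 ++ [block])

def dedupe_recipe_blocks_py (recipe : String) (seen : List String) : String :=
  PySem.Str.join "\n\n" (((pvSplitRecipeBlocks recipe).foldl pvDedupeStep (seen, [])).2)

-- ===== PORT B =====
-- inner 'while j < len(lines) and not lines[j].startswith("## "): j += 1'
def pvScan (lines : List String) (j : Nat) : Nat :=
  if _h : j < lines.length ∧ PySem.Str.startswith (lines.getD j "") "## " = false then
    pvScan lines (j + 1)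
  else j
termination_by lines.length - j
decreasing_by omega

-- termination fact for the outer loop (the scan never moves backwards)
lemma pvScan_ge (lines : List String) (j : Nat) : j ≤ pvScan lines j := by
  rw [pvScan]
  split
  · have := pvScan_ge lines (j + 1); omega
  · exact le_refl j
termination_by lines.length - j
decreasing_by rename_i h; omega

-- outer 'while i < len(lines): … blocks.append("\n".join(lines[i:j]).strip()); i = j'
def pvBlocksLoop (lines : List String) (i : Nat) (blocks : List String) : List String :=
  if h : i < lines.length then
    let j := pvScan lines (i + 1)
    pvBlocksLoop lines j
      (blocks ++ [PySem.Str.strip (PySem.Str.join "\n"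
        (PySem.List.slice lines (some (i : Int)) (some (j : Int))))])
  else blocks
termination_by lines.length - i
decreasing_by have := pvScan_ge lines (i + 1); omega

def dedupe_recipe_blocks_py_alt (recipe : String) (seen : List String) : String :=
  let lines := PySem.Str.splitlines recipe
  let blocks := pvBlocksLoop lines 0 []
  let kept := (PySem.List.dedup blocks).filter (fun b => !PySem.Set.contains seen b)
  PySem.Str.join "\n\n" kept

-- ===== PRECONDITION & SPEC =====
def Spec_dedupe_recipe_blocks_py (recipe : String) (seen : List String) (out : String) : Prop := out = dedupe_recipe_blocks_py_alt recipe seen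
instance (recipe : String) (seen : List String) (out : String) : Decidable (Spec_dedupe_recipe_blocks_py recipe seen out) := by unfold Spec_dedupe_recipe_blocks_py; infer_instance

-- ===== CLAIM (what is proved, stated in full; the proofs are below) =====
def Claim_equal_dedupe_recipe_blocks_py : Prop := ∀ (recipe : String) (seen : List String), Dom_dedupe_recipe_blocks_py recipe seen → Spec_dedupe_recipe_blocks_py recipe seen (dedupe_recipe_blocks_py recipe seen)

-- ===== LEMMAS AND PROOFS =====

-- common split spec: 'current' buffer, remaining lines
def pvFinish (current : List String) : String := PySem.Str.strip (PySem.Str.join "\n" current)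

def pvSplitB (current : List String) : List String → List String
  | [] => [pvFinish current]
  | l :: rest =>
    if PySem.Str.startswith l "## " then pvFinish current :: pvSplitB [l] rest
    else pvSplitB (current ++ [l]) rest

def pvSplitTop : List String → List String
  | [] => []
  | l :: rest => pvSplitB [l] rest

def pvP (s : String) : Bool := !PySem.Str.startswith s "## "

lemma pvTakeWhile_take (l : List String) (p : String → Bool) :
    l.takeWhile p = l.take (l.takeWhile p).length := by
  induction l with
  | nil => rfl
  | cons a t ih =>
    rw [List.takeWhile_cons]
    cases h : p a <;> simp
    exact ih

lemma pvDrop_takeWhile (l : List String) (p : String → Bool) :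
    l.drop (l.takeWhile p).length = l.dropWhile p := by
  induction l with
  | nil => rfl
  | cons a t ih =>
    rw [List.takeWhile_cons, List.dropWhile_cons]
    cases h : p a <;> simp [ih]

-- A's fold equals the split spec
lemma pvA_split (lines : List String) (blocks current : List String) (h : current ≠ []) :
    (let st := lines.foldl pvSplitStep (blocks, current)
     if st.2.isEmpty then st.1 else st.1 ++ [pvFinish st.2])
      = blocks ++ pvSplitB current lines := by
  induction lines generalizing blocks current with
  | nil => simp [pvSplitB, pvFinish, h]
  | cons l rest ih =>
    simp only [List.foldl_cons, pvSplitStep, pvSplitB]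
    by_cases hs : PySem.Str.startswith l "## " = true
    · simp only [hs, List.isEmpty_eq_false_iff.mpr h, if_pos, Bool.not_false, Bool.and_self]
      rw [ih _ [l] (by simp)]
      simp [pvFinish]
    · simp only [hs, Bool.false_and, Bool.false_eq_true, if_neg, not_false_iff]
      rw [ih _ (current ++ [l]) (by simp)]

-- the split spec in span form
lemma pvSplitB_span (lines : List String) (current : List String) :
    pvSplitB current lines
      = pvFinish (current ++ lines.takeWhile pvP) :: pvSplitTop (lines.dropWhile pvP) := by
  induction lines generalizing current with
  | nil => simp [pvSplitB, pvSplitTop]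
  | cons l rest ih =>
    rw [List.takeWhile_cons, List.dropWhile_cons]
    cases hs : PySem.Str.startswith l "## " with
    | true =>
      simp only [pvSplitB, hs, if_pos, pvP, Bool.not_true, Bool.false_eq_true, if_neg,
        not_false_iff, List.append_nil, pvSplitTop]
    | false =>
      simp only [pvSplitB, hs, Bool.false_eq_true, if_neg, not_false_iff, pvP, Bool.not_false,
        if_pos]
      rw [ih (current ++ [l])]
      simp

-- the scan computes the takeWhile length
lemma pvScan_eq (lines : List String) (j : Nat) :
    pvScan lines j = j + ((lines.drop j).takeWhile pvP).length := by
  rw [pvScan]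
  split
  · rename_i h
    obtain ⟨hjl, hsw⟩ := h
    rw [pvScan_eq lines (j + 1)]
    have hg : lines.getD j "" = lines[j]'hjl := by
      simp [List.getD, List.getElem?_eq_getElem hjl]
    have hpv : pvP (lines[j]'hjl) = true := by
      simp only [pvP, ← hg, hsw, Bool.not_false]
    rw [List.drop_eq_getElem_cons hjl, List.takeWhile_cons, if_pos hpv, List.length_cons]
    omega
  · rename_i h
    rcases Nat.lt_or_ge j lines.length with hj | hj
    · have hsw : PySem.Str.startswith (lines.getD j "") "## " = true := by
        by_contra hc
        exact h ⟨hj, by simpa using hc⟩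
      have hg : lines.getD j "" = lines[j]'hj := by
        simp [List.getD, List.getElem?_eq_getElem hj]
      have hpv : pvP (lines[j]'hj) = false := by
        simp only [pvP, ← hg, hsw, Bool.not_true]
      rw [List.drop_eq_getElem_cons hj, List.takeWhile_cons, if_neg (by simp [hpv])]
      simp
    · simp [List.drop_eq_nil_of_le hj]
termination_by lines.length - j
decreasing_by rename_i h; omega

-- B's loop equals the split spec on the remaining suffix
lemma pvB_loop (lines : List String) (i : Nat) (blocks : List String) (h : i < lines.length) :
    pvBlocksLoop lines i blocks = blocks ++ pvSplitTop (lines.drop i) := by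
  rw [pvBlocksLoop]
  simp only [h, dif_pos]
  have hj : pvScan lines (i + 1) = i + 1 + ((lines.drop (i + 1)).takeWhile pvP).length :=
    pvScan_eq lines (i + 1)
  have hdrop : lines.drop i = lines[i] :: lines.drop (i + 1) := List.drop_eq_getElem_cons h
  have hpre : (lines.drop (i + 1)).takeWhile pvP <+: lines.drop (i + 1) :=
    List.takeWhile_prefix pvP
  have htle : ((lines.drop (i + 1)).takeWhile pvP).length ≤ (lines.drop (i + 1)).length :=
    hpre.length_le
  have hlen : (lines.drop (i + 1)).length = lines.length - (i + 1) := by simp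
  have hjle : pvScan lines (i + 1) ≤ lines.length := by omega
  -- the slice is the head line plus the scanned prefix
  have hslice : PySem.List.slice lines (some (i : Int)) (some ((pvScan lines (i + 1)) : Int))
      = lines[i] :: (lines.drop (i + 1)).takeWhile pvP := by
    rw [hj, PySem.List.slice_natCast, hdrop]
    have he : i + 1 + ((lines.drop (i + 1)).takeWhile pvP).length - i
        = ((lines.drop (i + 1)).takeWhile pvP).length + 1 := by omega
    rw [he, List.take_succ_cons]
    congr 1
    exact (pvTakeWhile_take (lines.drop (i + 1)) pvP).symm
  -- the rest after the jump is the dropWhile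
  have hrest : lines.drop (pvScan lines (i + 1)) = (lines.drop (i + 1)).dropWhile pvP := by
    rw [hj, ← pvDrop_takeWhile (lines.drop (i + 1)) pvP, List.drop_drop]
  rw [hdrop]
  simp only [pvSplitTop]
  rw [pvSplitB_span]
  rcases Nat.lt_or_ge (pvScan lines (i + 1)) lines.length with hlt | hge
  · rw [pvB_loop lines _ _ hlt, hrest]
    have hne : (lines.drop (i + 1)).dropWhile pvP ≠ [] := by
      intro hnil
      rw [hnil] at hrest
      have h0 : (lines.drop (pvScan lines (i + 1))).length = 0 := by rw [hrest]; rfl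
      simp at h0
      omega
    rcases hd : (lines.drop (i + 1)).dropWhile pvP with _ | ⟨l, rest⟩
    · exact absurd hd hne
    · simp [pvSplitTop, pvFinish, hslice]
  · rw [pvBlocksLoop]
    simp only [Nat.not_lt.mpr hge]
    have hnil : (lines.drop (i + 1)).dropWhile pvP = [] := by
      rw [← hrest]
      exact List.drop_eq_nil_of_le hge
    rw [hnil]
    simp [pvSplitTop, pvFinish, hslice]
termination_by lines.length - i
decreasing_by have := pvScan_ge lines (i + 1); omega

-- common dedupe spec
def pvKeptOf (s : PySem.Set String) : List String → List String
  | [] => []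
  | b :: bs =>
    if PySem.Set.contains s b then pvKeptOf s bs
    else b :: pvKeptOf (PySem.Set.add s b) bs

-- A's dedupe fold equals the dedupe spec
lemma pvA_dedupe (blocks : List String) (s : PySem.Set String) (kept : List String) :
    (blocks.foldl pvDedupeStep (s, kept)).2 = kept ++ pvKeptOf s blocks := by
  induction blocks generalizing s kept with
  | nil => simp [pvKeptOf]
  | cons b bs ih =>
    simp only [List.foldl_cons, pvDedupeStep, pvKeptOf]
    by_cases hb : b ∈ s
    · simp [PySem.Set.contains, hb, ih]
    · simp [PySem.Set.contains, hb, ih]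

-- B's dict.fromkeys + filter equals the dedupe spec
lemma pvB_dedupe (blocks : List String) (s0 d s : PySem.Set String)
    (H : ∀ x, x ∈ s ↔ (x ∈ s0 ∨ x ∈ d)) :
    (blocks.foldl PySem.Set.add d).filter (fun b => !PySem.Set.contains s0 b)
      = d.filter (fun b => !PySem.Set.contains s0 b) ++ pvKeptOf s blocks := by
  induction blocks generalizing d s with
  | nil => simp [pvKeptOf]
  | cons b bs ih =>
    simp only [List.foldl_cons, pvKeptOf]
    by_cases hb : b ∈ s
    · have hbc : PySem.Set.contains s b = true := by
        simpa [PySem.Set.contains] using hb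
      rw [if_pos hbc]
      have hb' := (H b).mp hb
      have H' : ∀ x, x ∈ s ↔ (x ∈ s0 ∨ x ∈ PySem.Set.add d b) := by
        intro x
        simp only [PySem.Set.mem_add, H x]
        by_cases hx : x = b
        · subst hx; tauto
        · tauto
      rw [ih (PySem.Set.add d b) s H']
      congr 1
      rcases (H b).mp hb with h0 | hd
      · by_cases hdb : b ∈ d
        · have : PySem.Set.add d b = d := by
            simp [PySem.Set.add, PySem.Set.contains, hdb]
          rw [this]
        · have hadd : PySem.Set.add d b = d ++ [b] := by
            simp [PySem.Set.add, PySem.Set.contains, hdb]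
          have h0c : PySem.Set.contains s0 b = true := by
            simpa [PySem.Set.contains] using h0
          rw [hadd, List.filter_append]
          simp [h0]
      · have : PySem.Set.add d b = d := by
          simp [PySem.Set.add, PySem.Set.contains, hd]
        rw [this]
    · have h0 : b ∉ s0 := fun h => hb ((H b).mpr (Or.inl h))
      have hd : b ∉ d := fun h => hb ((H b).mpr (Or.inr h))
      rw [if_neg (by simpa using hb)]
      have hadd : PySem.Set.add d b = d ++ [b] := by
        simp [PySem.Set.add, PySem.Set.contains, hd]
      have H' : ∀ x, x ∈ PySem.Set.add s b ↔ (x ∈ s0 ∨ x ∈ PySem.Set.add d b) := by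
        intro x
        simp only [PySem.Set.mem_add, H x]
        by_cases hx : x = b
        · subst hx; tauto
        · tauto
      rw [ih (PySem.Set.add d b) (PySem.Set.add s b) H', hadd, List.filter_append]
      simp [h0]

-- the two ports compute the same block list
lemma pvBlocks_eq (recipe : String) :
    pvSplitRecipeBlocks recipe = pvBlocksLoop (PySem.Str.splitlines recipe) 0 [] := by
  unfold pvSplitRecipeBlocks
  rcases hl : PySem.Str.splitlines recipe with _ | ⟨l, rest⟩
  · simp [pvBlocksLoop]
  · rw [pvB_loop _ 0 [] (by simp), List.drop_zero]
    simp only [pvSplitTop, List.foldl_cons, List.nil_append]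
    have h1 : pvSplitStep ([], []) l = ([], [l]) := by
      simp [pvSplitStep]
    rw [h1]
    have := pvA_split rest [] [l] (by simp)
    simpa [pvFinish] using this

-- ===== VERDICT (by name: the statement is the Claim_ definition above) =====
theorem dedupe_recipe_blocks_py_spec : Claim_equal_dedupe_recipe_blocks_py := by
  intro recipe seen _
  unfold Spec_dedupe_recipe_blocks_py dedupe_recipe_blocks_py dedupe_recipe_blocks_py_alt
  dsimp only
  rw [pvBlocks_eq, pvA_dedupe]
  rw [show PySem.List.dedup (pvBlocksLoop (PySem.Str.splitlines recipe) 0 [])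
      = (pvBlocksLoop (PySem.Str.splitlines recipe) 0 []).foldl PySem.Set.add [] from rfl]
  rw [pvB_dedupe _ seen [] seen (by intro x; simp)]
  simp
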